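-- pv_equiv track=rewrite | github.com/JackSawyerWATX/Rice | main.py | largest_set_size
-- ===== SOURCE A (Python) =====
-- def largest_set_size(riceBags, idx, prev_grains):
--     # Recursively find the size of the set starting from idx
--     size = 0
--     current_grains = prev_grains
--
--     while idx < len(riceBags):
--         if riceBags[idx] == current_grains * current_grains:
--             size += 1
--             current_grains = riceBags[idx]
--             idx += 1
--         else:
--             break
--
--     return size
-- ===== SOURCE B (Python) =====
-- def largest_set_size(riceBags, idx, prev_grains):
--     if idx >= len(riceBags) or riceBags[idx] != prev_grains * prev_grains:
--         return 0
--     return 1 + largest_set_size(riceBags, idx + 1, riceBags[idx])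
-- ===== Notes on version B (the rewrite author's own statement) =====
-- stated objective: simpler
-- what changed: Replaced the while-loop with accumulator variables (size, current_grains) by a direct recursion on idx carrying the previous value, returning 1 + recursive call.
import Mathlib
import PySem

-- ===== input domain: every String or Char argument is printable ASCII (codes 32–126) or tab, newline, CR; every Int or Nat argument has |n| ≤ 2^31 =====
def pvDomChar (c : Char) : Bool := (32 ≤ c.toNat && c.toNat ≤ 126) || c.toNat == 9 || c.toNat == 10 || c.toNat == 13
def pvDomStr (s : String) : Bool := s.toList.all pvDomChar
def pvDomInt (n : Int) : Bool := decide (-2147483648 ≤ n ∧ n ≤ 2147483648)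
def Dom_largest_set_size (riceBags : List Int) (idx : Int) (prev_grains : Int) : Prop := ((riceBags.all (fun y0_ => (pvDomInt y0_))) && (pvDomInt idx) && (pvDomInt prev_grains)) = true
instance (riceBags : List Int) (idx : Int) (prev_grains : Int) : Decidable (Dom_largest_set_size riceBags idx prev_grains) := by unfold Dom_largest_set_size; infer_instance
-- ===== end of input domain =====

-- B replaces A's while-loop with accumulators by a direct recursion on idx; objective: simpler.


-- ===== PORT A =====
-- A's while-loop: state (idx, current_grains, size); Python raises IndexError when
-- riceBags[idx] is out of range (pyGet? = none) — that case is excluded by Pre_.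
def largestLoopA (riceBags : List Int) (idx : Int) (cur : Int) (size : Int) : Int :=
  if h : idx < (riceBags.length : Int) then
    match PySem.List.pyGet? riceBags idx with
    | none => size  -- Python raises here (outside Pre_)
    | some v =>
      if v = cur * cur then largestLoopA riceBags (idx + 1) v (size + 1)
      else size
  else size
termination_by ((riceBags.length : Int) - idx).toNat
decreasing_by omega

def largest_set_size (riceBags : List Int) (idx : Int) (prev_grains : Int) : Int :=
  largestLoopA riceBags idx prev_grains 0

-- ===== PORT B =====
def largest_set_size_alt (riceBags : List Int) (idx : Int) (prev_grains : Int) : Int :=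
  if h : idx ≥ (riceBags.length : Int) then 0
  else
    match PySem.List.pyGet? riceBags idx with
    | none => 0  -- Python raises here (outside Pre_)
    | some v =>
      if v ≠ prev_grains * prev_grains then 0
      else 1 + largest_set_size_alt riceBags (idx + 1) v
termination_by ((riceBags.length : Int) - idx).toNat
decreasing_by omega

-- ===== PRECONDITION & SPEC =====
-- Pre_ excludes exactly the inputs where Python A raises IndexError: idx < -len(riceBags)
-- (then riceBags[idx] is out of range; any in-range start keeps all later accesses in range).
def Pre_largest_set_size (riceBags : List Int) (idx : Int) (prev_grains : Int) : Prop :=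
  -(riceBags.length : Int) ≤ idx
instance (riceBags : List Int) (idx : Int) (prev_grains : Int) : Decidable (Pre_largest_set_size riceBags idx prev_grains) := by unfold Pre_largest_set_size; infer_instance
def pvWitness_largest_set_size : List Int × Int × Int := ([4, 16, 256, 7], 0, 2)

def Spec_largest_set_size (riceBags : List Int) (idx : Int) (prev_grains : Int) (out : Int) : Prop := out = largest_set_size_alt riceBags idx prev_grains
instance (riceBags : List Int) (idx : Int) (prev_grains : Int) (out : Int) : Decidable (Spec_largest_set_size riceBags idx prev_grains out) := by unfold Spec_largest_set_size; infer_instance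

-- ===== CLAIM (what is proved, stated in full; the proofs are below) =====
def Claim_equal_largest_set_size : Prop := ∀ (riceBags : List Int) (idx : Int) (prev_grains : Int), Dom_largest_set_size riceBags idx prev_grains → Pre_largest_set_size riceBags idx prev_grains → Spec_largest_set_size riceBags idx prev_grains (largest_set_size riceBags idx prev_grains)

-- ===== LEMMAS AND PROOFS =====
-- Loop invariant: the A-loop from state (idx, cur, size) returns size + B's count from (idx, cur).
theorem largestLoopA_eq_alt (riceBags : List Int) (idx cur size : Int) :
    largestLoopA riceBags idx cur size = size + largest_set_size_alt riceBags idx cur := by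
  rw [largestLoopA, largest_set_size_alt]
  by_cases h : idx < (riceBags.length : Int)
  · simp only [dif_pos h, dif_neg (by omega : ¬ idx ≥ (riceBags.length : Int))]
    cases hg : PySem.List.pyGet? riceBags idx with
    | none => simp
    | some v =>
      dsimp only
      by_cases hv : v = cur * cur
      · rw [if_pos hv, if_neg (by simp [hv]), largestLoopA_eq_alt]
        omega
      · simp [hv]
  · simp only [dif_neg h, dif_pos (by omega : idx ≥ (riceBags.length : Int))]
    simp
termination_by ((riceBags.length : Int) - idx).toNat
decreasing_by omega

-- ===== VERDICT (by name: the statement is the Claim_ definition above) =====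
theorem largest_set_size_spec : Claim_equal_largest_set_size := by
  intro riceBags idx prev_grains _ _
  unfold Spec_largest_set_size largest_set_size
  rw [largestLoopA_eq_alt]
  omega
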